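-- pv_equiv track=rewrite | github.com/SuchitG04/cs336 | assignment1-basics/cs336_basics/train_bpe.py | get_pair_stats
-- ===== SOURCE A (Python) =====
-- from collections import Counter, defaultdict
--
-- def get_pair_stats(
--     sorted_word_count: list[tuple[tuple, int]]
-- ) -> tuple[Counter, defaultdict[tuple, Counter]]:
--     pair_stats, pair_indices = Counter(), defaultdict(Counter)
--     for i, (word, freq) in enumerate(sorted_word_count):
--         for p in zip(word, word[1:]):
--             pair_stats[p] += freq
--             pair_indices[p][i] += 1
--
--     return pair_stats, pair_indices
-- ===== SOURCE B (Python) =====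
-- from collections import Counter, defaultdict
--
-- def get_pair_stats(sorted_word_count):
--     # Flatten every adjacent-pair occurrence into a (pair, word-index) event.
--     events = [((a, b), i)
--               for i, (word, _) in enumerate(sorted_word_count)
--               for a, b in zip(word, word[1:])]
--     # One flat loop groups the events into pair -> (word index -> occurrence count).
--     pair_indices = defaultdict(Counter)
--     for p, i in events:
--         pair_indices[p][i] += 1
--     # Derive the totals from the index: count * word frequency, summed per pair.
--     pair_stats = Counter({p: sum(c * sorted_word_count[i][1] for i, c in ctr.items())
--                           for p, ctr in pair_indices.items()})
--     return pair_stats, pair_indices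
-- ===== Notes on version B (the rewrite author's own statement) =====
-- stated objective: alternative
-- what changed: A's single fused nested loop accumulating pair_stats and pair_indices together is replaced by a staged pipeline: flatten all adjacent-pair occurrences into a (pair, word-index) event list, group that flat list into pair_indices with one loop, then derive pair_stats from the index by a dict comprehension summing count * word frequency per pair.
import Mathlib
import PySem

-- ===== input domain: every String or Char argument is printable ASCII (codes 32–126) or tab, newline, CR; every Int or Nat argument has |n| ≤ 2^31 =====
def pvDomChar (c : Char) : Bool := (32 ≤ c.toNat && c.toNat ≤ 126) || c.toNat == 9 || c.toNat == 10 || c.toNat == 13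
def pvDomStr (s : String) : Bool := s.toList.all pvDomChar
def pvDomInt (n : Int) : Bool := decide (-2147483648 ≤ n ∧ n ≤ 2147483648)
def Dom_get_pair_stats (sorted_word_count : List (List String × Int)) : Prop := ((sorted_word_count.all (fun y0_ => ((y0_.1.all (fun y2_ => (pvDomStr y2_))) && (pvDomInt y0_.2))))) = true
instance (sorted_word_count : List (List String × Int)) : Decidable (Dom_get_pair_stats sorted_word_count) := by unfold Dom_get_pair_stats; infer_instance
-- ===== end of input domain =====

-- B replaces A's fused nested accumulation with a staged pipeline: flatten occurrences to events, group them into pair_indices, then derive pair_stats from the index (alternative decomposition, same cost).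


-- ===== PORT A =====
-- A: one fused loop over enumerate(sorted_word_count) and adjacent pairs, updating both
-- pair_stats (Counter) and pair_indices (defaultdict(Counter)) together.
def get_pair_stats (sorted_word_count : List (List String × Int)) : (List (List String × Int)) × (List (List String × List (Int × Int))) :=
  let st := (PySem.List.enumerate sorted_word_count).foldl
    (fun (st : PySem.Dict (List String) Int × PySem.Dict (List String) (PySem.Dict Int Int)) iwf =>
      (iwf.2.1.zip (PySem.List.slice iwf.2.1 (some 1) none)).foldl
        (fun st2 p =>
          (st2.1.modify [p.1, p.2] 0 (· + iwf.2.2),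
           st2.2.modify [p.1, p.2] PySem.Dict.empty (fun c => c.modify iwf.1 0 (· + 1))))
        st)
    (PySem.Dict.empty, PySem.Dict.empty)
  (st.1.items, st.2.items.map (fun q => (q.1, q.2.items)))

-- ===== PORT B =====
-- B: stage 1 flattens all adjacent-pair occurrences into (pair, word-index) events;
-- stage 2 groups the flat event list into pair_indices; stage 3 derives pair_stats
-- from the index as a comprehension: pair -> sum of count * word frequency.
def get_pair_stats_alt (sorted_word_count : List (List String × Int)) : (List (List String × Int)) × (List (List String × List (Int × Int))) :=
  let events : List (List String × Int) :=
    (PySem.List.enumerate sorted_word_count).flatMap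
      (fun iwf => (iwf.2.1.zip (PySem.List.slice iwf.2.1 (some 1) none)).map
        (fun ab => ([ab.1, ab.2], iwf.1)))
  let pair_indices : PySem.Dict (List String) (PySem.Dict Int Int) :=
    events.foldl
      (fun d e => d.modify e.1 PySem.Dict.empty (fun c => c.modify e.2 0 (· + 1)))
      PySem.Dict.empty
  let pair_stats : List (List String × Int) :=
    pair_indices.items.map
      (fun q => (q.1, (q.2.items.map
        (fun ic => ic.2 * (PySem.List.pyGetD sorted_word_count ic.1 ([], 0)).2)).sum))
  (pair_stats, pair_indices.items.map (fun q => (q.1, q.2.items)))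

-- ===== PRECONDITION & SPEC =====
def Spec_get_pair_stats (sorted_word_count : List (List String × Int)) (out : (List (List String × Int)) × (List (List String × List (Int × Int)))) : Prop := out = get_pair_stats_alt sorted_word_count
instance (sorted_word_count : List (List String × Int)) (out : (List (List String × Int)) × (List (List String × List (Int × Int)))) : Decidable (Spec_get_pair_stats sorted_word_count out) := by unfold Spec_get_pair_stats; infer_instance

-- ===== CLAIM (what is proved, stated in full; the proofs are below) =====
def Claim_equal_get_pair_stats : Prop := ∀ (sorted_word_count : List (List String × Int)), Dom_get_pair_stats sorted_word_count → Spec_get_pair_stats sorted_word_count (get_pair_stats sorted_word_count)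

-- ===== LEMMAS AND PROOFS =====

def pvPairTriples (iwf : Int × (List String × Int)) : List (List String × (Int × Int)) :=
  (iwf.2.1.zip (PySem.List.slice iwf.2.1 (some 1) none)).map (fun p => ([p.1, p.2], (iwf.1, iwf.2.2)))

def pvOcc (swc : List (List String × Int)) : List (List String × (Int × Int)) :=
  (PySem.List.enumerate swc).flatMap pvPairTriples

def pvStatsA (swc : List (List String × Int)) : PySem.Dict (List String) Int :=
  (pvOcc swc).foldl (fun d t => d.modify t.1 0 (· + t.2.2)) PySem.Dict.empty

def pvIdx (swc : List (List String × Int)) : PySem.Dict (List String) (PySem.Dict Int Int) :=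
  (pvOcc swc).foldl (fun d t => d.modify t.1 PySem.Dict.empty (fun c => c.modify t.2.1 0 (· + 1))) PySem.Dict.empty

def pvFreq (swc : List (List String × Int)) (i : Int) : Int :=
  (PySem.List.pyGetD swc i ([], 0)).2

theorem pvOcc_freq (swc : List (List String × Int)) :
    ∀ t ∈ pvOcc swc, t.2.2 = pvFreq swc t.2.1 := by
  intro t ht
  rw [pvOcc, List.mem_flatMap] at ht
  obtain ⟨iwf, hiwf, hmem⟩ := ht
  rw [PySem.List.mem_enumerate_iff] at hiwf
  obtain ⟨j, hj, rfl⟩ := hiwf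
  rw [pvPairTriples, List.mem_map] at hmem
  obtain ⟨p, -, rfl⟩ := hmem
  simp [pvFreq, PySem.List.pyGetD_natCast, List.getD_eq_getElem?_getD, hj]

theorem pvB_idx_eq (swc : List (List String × Int)) :
    ((PySem.List.enumerate swc).flatMap
      (fun iwf => (iwf.2.1.zip (PySem.List.slice iwf.2.1 (some 1) none)).map
        (fun ab => ([ab.1, ab.2], iwf.1)))).foldl
      (fun (d : PySem.Dict (List String) (PySem.Dict Int Int)) e =>
        d.modify e.1 PySem.Dict.empty (fun c => c.modify e.2 0 (· + 1)))
      PySem.Dict.empty = pvIdx swc := by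
  have hev : ((PySem.List.enumerate swc).flatMap
      (fun iwf => (iwf.2.1.zip (PySem.List.slice iwf.2.1 (some 1) none)).map
        (fun ab => ([ab.1, ab.2], iwf.1))))
      = (pvOcc swc).map (fun t => (t.1, t.2.1)) := by
    rw [pvOcc, List.map_flatMap]
    refine List.flatMap_congr ?_
    intro iwf _
    simp [pvPairTriples, List.map_map, Function.comp]
  rw [hev, List.foldl_map]
  rfl

theorem pvA_eq (swc : List (List String × Int)) :
    get_pair_stats swc = ((pvStatsA swc).items, (pvIdx swc).items.map (fun q => (q.1, q.2.items))) := by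
  rw [get_pair_stats, pvStatsA, pvIdx, pvOcc]
  simp only [List.foldl_flatMap, pvPairTriples, List.foldl_map]
  rw [show (fun (st : PySem.Dict (List String) Int × PySem.Dict (List String) (PySem.Dict Int Int)) (iwf : Int × (List String × Int)) =>
      (iwf.2.1.zip (PySem.List.slice iwf.2.1 (some 1) none)).foldl
        (fun st2 p =>
          (st2.1.modify [p.1, p.2] 0 (· + iwf.2.2),
           st2.2.modify [p.1, p.2] PySem.Dict.empty (fun c => c.modify iwf.1 0 (· + 1))))
        st)
    = (fun st iwf =>
        ((iwf.2.1.zip (PySem.List.slice iwf.2.1 (some 1) none)).foldl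
          (fun a p => a.modify [p.1, p.2] 0 (· + iwf.2.2)) st.1,
         (iwf.2.1.zip (PySem.List.slice iwf.2.1 (some 1) none)).foldl
          (fun b p => b.modify [p.1, p.2] PySem.Dict.empty (fun c => c.modify iwf.1 0 (· + 1))) st.2)) from by
    funext st iwf
    obtain ⟨a, b⟩ := st
    exact PySem.List.foldl_prod_mk
      (fun (a : PySem.Dict (List String) Int) (p : String × String) => a.modify [p.1, p.2] 0 (· + iwf.2.2))
      (fun (b : PySem.Dict (List String) (PySem.Dict Int Int)) (p : String × String) => b.modify [p.1, p.2] PySem.Dict.empty (fun c => c.modify iwf.1 0 (· + 1)))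
      _ a b]
  rw [PySem.List.foldl_prod_mk
      (fun (a : PySem.Dict (List String) Int) (iwf : Int × (List String × Int)) =>
        (iwf.2.1.zip (PySem.List.slice iwf.2.1 (some 1) none)).foldl
          (fun a (p : String × String) => a.modify [p.1, p.2] 0 (· + iwf.2.2)) a)
      (fun (b : PySem.Dict (List String) (PySem.Dict Int Int)) (iwf : Int × (List String × Int)) =>
        (iwf.2.1.zip (PySem.List.slice iwf.2.1 (some 1) none)).foldl
          (fun b (p : String × String) => b.modify [p.1, p.2] PySem.Dict.empty (fun c => c.modify iwf.1 0 (· + 1))) b)]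

theorem pvGetD_foldl_modify {κ ν β : Type} [BEq κ] [LawfulBEq κ] [DecidableEq κ]
    (l : List β) (k : β → κ) (F : β → ν → ν) (d0 : ν) (d : PySem.Dict κ ν) (p : κ) :
    (l.foldl (fun d t => d.modify (k t) d0 (F t)) d).getD p d0
      = (l.filter (fun t => k t == p)).foldl (fun v t => F t v) (d.getD p d0) := by
  induction l generalizing d with
  | nil => simp
  | cons t l ih =>
    simp only [List.foldl_cons, List.filter_cons]
    rw [ih]
    by_cases h : k t = p
    · simp [h]
    · simp [h, PySem.Dict.getD_modify, Ne.symm h]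

theorem pvKeys_eq (swc : List (List String × Int)) :
    (pvStatsA swc).keys = (pvIdx swc).keys := by
  rw [pvStatsA, pvIdx,
    PySem.Dict.keys_foldl_modify_key (pvOcc swc) (·.1) 0 (fun _ t => (· + t.2.2)),
    PySem.Dict.keys_foldl_modify_key (pvOcc swc) (·.1) PySem.Dict.empty
      (fun _ t => (fun c => c.modify t.2.1 0 (· + 1)))]
  rfl

theorem pvStatsA_nodup (swc : List (List String × Int)) : (pvStatsA swc).keys.Nodup := by
  rw [pvStatsA]
  exact PySem.Dict.nodup_keys_foldl_modify_key (pvOcc swc) (·.1) 0 (fun _ t => (· + t.2.2)) _ (by simp)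

theorem pvIdx_nodup (swc : List (List String × Int)) : (pvIdx swc).keys.Nodup := by
  rw [pvIdx]
  exact PySem.Dict.nodup_keys_foldl_modify_key (pvOcc swc) (·.1) PySem.Dict.empty
    (fun _ t => (fun c => c.modify t.2.1 0 (· + 1))) _ (by simp)

theorem pvIdx_getD (swc : List (List String × Int)) (p : List String) :
    (pvIdx swc).getD p PySem.Dict.empty
      = PySem.Dict.counter (((pvOcc swc).filter (fun t => t.1 == p)).map (·.2.1)) := by
  have h := pvGetD_foldl_modify (pvOcc swc) (fun t => t.1)
    (fun t => (fun (c : PySem.Dict Int Int) => c.modify t.2.1 0 (· + 1)))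
    PySem.Dict.empty PySem.Dict.empty p
  rw [pvIdx]
  refine h.trans ?_
  rw [PySem.Dict.counter_eq_foldl, List.foldl_map]
  simp [PySem.Dict.getD_empty]

theorem pvPointwise (swc : List (List String × Int)) (p : List String) :
    (pvStatsA swc).getD p 0
      = (((pvIdx swc).getD p PySem.Dict.empty).items.map
          (fun ic => ic.2 * pvFreq swc ic.1)).sum := by
  rw [pvIdx_getD, pvStatsA, pvGetD_foldl_modify (pvOcc swc) (fun t => t.1)
    (fun t => (· + t.2.2)) 0 PySem.Dict.empty p]
  rw [PySem.Dict.items_counter, List.map_map]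
  simp only [PySem.Dict.getD_empty]
  rw [PySem.List.foldl_add ((pvOcc swc).filter (fun t => t.1 == p)) (·.2.2) 0]
  have h1 : ((pvOcc swc).filter (fun t => t.1 == p)).map (·.2.2)
      = (((pvOcc swc).filter (fun t => t.1 == p)).map (·.2.1)).map (pvFreq swc) := by
    rw [List.map_map]
    exact List.map_congr_left (fun t ht => pvOcc_freq swc t (List.mem_of_mem_filter ht))
  rw [h1, Finset.sum_list_map_count]
  set is := ((pvOcc swc).filter (fun t => t.1 == p)).map (·.2.1) with his
  have h2 : (PySem.Set.ofList is).toFinset = is.toFinset := by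
    ext i; simp [List.mem_toFinset, PySem.Set.mem_ofList]
  rw [← List.sum_toFinset _ (PySem.Set.nodup_ofList is), h2]
  simp [Function.comp]

theorem pvMain (swc : List (List String × Int)) :
    get_pair_stats swc = get_pair_stats_alt swc := by
  rw [pvA_eq]
  simp only [get_pair_stats_alt]
  rw [pvB_idx_eq]
  rw [Prod.mk.injEq]
  refine ⟨?_, rfl⟩
  rw [PySem.Dict.items_eq_map_keys _ (pvStatsA_nodup swc) 0,
      PySem.Dict.items_eq_map_keys _ (pvIdx_nodup swc) PySem.Dict.empty,
      List.map_map, pvKeys_eq]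
  refine List.map_congr_left ?_
  intro k _
  simp only [Function.comp]
  rw [pvPointwise]
  simp [pvFreq]

-- ===== VERDICT (by name: the statement is the Claim_ definition above) =====
theorem get_pair_stats_spec : Claim_equal_get_pair_stats := by
  intro swc _
  unfold Spec_get_pair_stats
  exact pvMain swc
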